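-- pv_equiv track=rewrite | github.com/nervjack2/Speech-SSL-FFN-Analysis | tools.py | get_monophone_end
-- ===== SOURCE A (Python) =====
-- def get_monophone_end(phoneme):
--     pidx = []
--     pre_x = phoneme[0]
--     for idx, x in enumerate(phoneme):
--         if x != pre_x:
--             pidx.append(idx-1)
--         pre_x = x
--     return pidx
-- ===== SOURCE B (Python) =====
-- def get_monophone_end(phoneme):
--     # Stage 1: run-length encode the sequence.
--     runs = []
--     for x in phoneme:
--         if runs and runs[-1][0] == x:
--             runs[-1][1] += 1
--         else:
--             runs.append([x, 1])
--     # Stage 2: cumulative run lengths; every run except the last ends a monophone.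
--     ends = []
--     total = 0
--     for _, length in runs[:-1]:
--         total += length
--         ends.append(total - 1)
--     return ends
-- ===== Notes on version B (the rewrite author's own statement) =====
-- stated objective: alternative
-- what changed: Replaces A's single stateful change-detection loop with a two-stage pipeline: run-length encode the sequence, then prefix-sum the run lengths, emitting cumulative-length-minus-one for every run except the last.
-- outside the precondition, e.g. on get_monophone_end([]): A raises IndexError, B returns []
import Mathlib
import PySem

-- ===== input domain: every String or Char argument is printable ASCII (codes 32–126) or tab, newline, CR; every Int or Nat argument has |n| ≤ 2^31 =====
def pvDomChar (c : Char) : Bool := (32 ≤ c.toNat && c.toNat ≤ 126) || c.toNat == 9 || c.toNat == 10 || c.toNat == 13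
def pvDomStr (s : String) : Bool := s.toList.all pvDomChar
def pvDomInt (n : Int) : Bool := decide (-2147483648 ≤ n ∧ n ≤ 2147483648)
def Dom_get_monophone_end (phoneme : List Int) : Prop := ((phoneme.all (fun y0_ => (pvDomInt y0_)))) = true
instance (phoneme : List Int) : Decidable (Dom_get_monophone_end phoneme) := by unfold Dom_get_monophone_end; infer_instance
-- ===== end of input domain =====

-- B re-implements A as a two-stage pipeline (run-length encode, then prefix-sum the run lengths); alternative decomposition, same cost; B returns [] on the empty list where A raises IndexError.


-- ===== PORT A =====
def get_monophone_end (phoneme : List Int) : List Int :=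
  match PySem.List.pyGet? phoneme 0 with
  | none => []   -- unreachable under Pre_ (phoneme ≠ []): Python raises IndexError here
  | some p0 =>
    ((PySem.List.enumerate phoneme).foldl
      (fun (st : List Int × Int) (ix : Int × Int) =>
        (if ix.2 ≠ st.2 then st.1 ++ [ix.1 - 1] else st.1, ix.2))
      ([], p0)).1

-- ===== PORT B =====
-- stage 1 step: 'if runs and runs[-1][0] == x: runs[-1][1] += 1 else: runs.append([x, 1])'
def pvRleStep (runs : List (Int × Int)) (x : Int) : List (Int × Int) :=
  match runs.getLast? with
  | some last => if last.1 == x then runs.dropLast ++ [(last.1, last.2 + 1)] else runs ++ [(x, 1)]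
  | none => runs ++ [(x, 1)]

def get_monophone_end_alt (phoneme : List Int) : List Int :=
  let runs := phoneme.foldl pvRleStep []
  ((PySem.List.slice runs none (some (-1))).foldl
    (fun (st : List Int × Int) (r : Int × Int) => (st.1 ++ [st.2 + r.2 - 1], st.2 + r.2))
    ([], 0)).1

-- ===== PRECONDITION & SPEC =====
-- Pre_ excludes only the empty list, on which Python A raises IndexError reading the first element.
def Pre_get_monophone_end (phoneme : List Int) : Prop := phoneme ≠ []
instance (phoneme : List Int) : Decidable (Pre_get_monophone_end phoneme) := by unfold Pre_get_monophone_end; infer_instance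
def pvWitness_get_monophone_end : List Int := [3, 3, 5]
def Spec_get_monophone_end (phoneme : List Int) (out : List Int) : Prop := out = get_monophone_end_alt phoneme
instance (phoneme : List Int) (out : List Int) : Decidable (Spec_get_monophone_end phoneme out) := by unfold Spec_get_monophone_end; infer_instance

-- ===== CLAIM (what is proved, stated in full; the proofs are below) =====
def Claim_equal_get_monophone_end : Prop := ∀ (phoneme : List Int), Dom_get_monophone_end phoneme → Pre_get_monophone_end phoneme → Spec_get_monophone_end phoneme (get_monophone_end phoneme)

-- ===== LEMMAS AND PROOFS =====

/-- Reference recursion: the indices (offset `s`) at which a new run begins, minus nothing —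
    each change while walking `xs` with previous value `pre` contributes the current offset. -/
def pvRuns (pre : Int) (xs : List Int) (s : Int) : List Int :=
  match xs with
  | [] => []
  | x :: xs' => (if x ≠ pre then [s] else []) ++ pvRuns x xs' (s + 1)

/-- Reference recursion for run-length groups: grouping `xs` after an open run `(v, k)`. -/
def pvGrp (v : Int) (k : Int) (xs : List Int) : List (Int × Int) :=
  match xs with
  | [] => [(v, k)]
  | x :: xs' => if x = v then pvGrp v (k + 1) xs' else (v, k) :: pvGrp x 1 xs'

theorem pvA_loop (xs : List Int) : ∀ (s : Int) (pre : Int) (acc : List Int),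
    ((PySem.List.enumerate xs s).foldl
      (fun (st : List Int × Int) (ix : Int × Int) =>
        (if ix.2 ≠ st.2 then st.1 ++ [ix.1 - 1] else st.1, ix.2))
      (acc, pre)).1 = acc ++ pvRuns pre xs (s - 1) := by
  induction xs with
  | nil => intro s pre acc; simp [pvRuns, PySem.List.enumerate_nil]
  | cons x xs ih =>
    intro s pre acc
    rw [PySem.List.enumerate_cons]
    simp only [List.foldl_cons, pvRuns]
    rw [ih]
    have : s + 1 - 1 = s - 1 + 1 := by omega
    rw [this]
    by_cases h : x = pre <;> simp [h]

theorem pvGrp_ne_nil (xs : List Int) : ∀ (v k : Int), pvGrp v k xs ≠ [] := by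
  induction xs with
  | nil => intro v k; simp [pvGrp]
  | cons x xs ih =>
    intro v k
    by_cases h : x = v <;> simp [pvGrp, h, ih]

/-- Stage-1 invariant: folding `pvRleStep` from a runs list with open last run `(v, k)`. -/
theorem pvB_stage1 (xs : List Int) : ∀ (pref : List (Int × Int)) (v k : Int),
    xs.foldl pvRleStep (pref ++ [(v, k)]) = pref ++ pvGrp v k xs := by
  induction xs with
  | nil => intro pref v k; simp [pvGrp]
  | cons x xs ih =>
    intro pref v k
    simp only [List.foldl_cons]
    by_cases h : x = v
    · have : pvRleStep (pref ++ [(v, k)]) x = pref ++ [(v, k + 1)] := by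
        simp [pvRleStep, h.symm]
      rw [this, ih, pvGrp, if_pos h]
    · have : pvRleStep (pref ++ [(v, k)]) x = (pref ++ [(v, k)]) ++ [(x, 1)] := by
        simp [pvRleStep]
        intro h'; exact absurd h'.symm h
      rw [this, ih, pvGrp, if_neg h, List.append_assoc]
      rfl

/-- Stage-2 invariant: prefix-summing all groups but the last yields `pvRuns`. -/
theorem pvB_stage2 (xs : List Int) : ∀ (v k : Int) (acc : List Int) (t : Int),
    (((pvGrp v k xs).dropLast).foldl
      (fun (st : List Int × Int) (r : Int × Int) => (st.1 ++ [st.2 + r.2 - 1], st.2 + r.2))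
      (acc, t)).1 = acc ++ pvRuns v xs (t + k - 1) := by
  induction xs with
  | nil => intro v k acc t; simp [pvGrp, pvRuns]
  | cons x xs ih =>
    intro v k acc t
    by_cases h : x = v
    · rw [pvGrp, if_pos h, ih]
      have : t + (k + 1) - 1 = t + k - 1 + 1 := by omega
      rw [this, pvRuns, if_neg (by simp [h])]
      simp [h]
    · rw [pvGrp, if_neg h]
      have hne := pvGrp_ne_nil xs x 1
      rw [List.dropLast_cons_of_ne_nil hne, List.foldl_cons, ih]
      have h1 : t + k + 1 - 1 = t + k - 1 + 1 := by omega
      rw [pvRuns, if_pos (by simp [h]), h1]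
      simp

-- ===== VERDICT (by name: the statement is the Claim_ definition above) =====
theorem get_monophone_end_spec : Claim_equal_get_monophone_end := by
  intro phoneme _ hpre
  unfold Spec_get_monophone_end get_monophone_end get_monophone_end_alt
  cases phoneme with
  | nil => exact absurd rfl hpre
  | cons p0 rest =>
    have h0 : PySem.List.pyGet? (p0 :: rest) 0 = some p0 := by
      simp [PySem.List.pyGet?, PySem.List.pyIdx?]
    rw [h0]
    show ((PySem.List.enumerate (p0 :: rest) 0).foldl
      (fun (st : List Int × Int) (ix : Int × Int) =>
        (if ix.2 ≠ st.2 then st.1 ++ [ix.1 - 1] else st.1, ix.2))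
      ([], p0)).1 = _
    rw [pvA_loop]
    have hs1 : (p0 :: rest).foldl pvRleStep [] = pvGrp p0 1 rest := by
      have : pvRleStep [] p0 = [] ++ [(p0, 1)] := by simp [pvRleStep]
      simpa [this] using pvB_stage1 rest [] p0 1
    simp only [hs1, PySem.List.slice_to_neg_one]
    rw [pvB_stage2]
    simp [pvRuns]
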